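-- pv_equiv track=rewrite | github.com/AdrijusC/adrijusc.github.io | Pyth sav/1uzd.py | procesint
-- ===== SOURCE A (Python) =====
-- def procesint(duom):
--
--     atrinkti = []
--
--     for grupe_pav, begikai in duom.items():
--         begikai.sort(key=lambda x: x[1])
--         kiek_atrinkti = len(begikai) // 2
--         atrinkti.extend(begikai[:kiek_atrinkti])
--
--     atrinkti.sort(key=lambda x: x[1])
--     return atrinkti
-- ===== SOURCE B (Python) =====
-- def _merge(a, b):
--     i = 0
--     j = 0
--     res = []
--     while i < len(a) and j < len(b):
--         if a[i][1] <= b[j][1]: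
--             res.append(a[i])
--             i += 1
--         else:
--             res.append(b[j])
--             j += 1
--     res.extend(a[i:])
--     res.extend(b[j:])
--     return res
--
--
-- def procesint(duom):
--     runs = []
--     for begikai in duom.values():
--         begikai.sort(key=lambda x: x[1])
--         runs.append(begikai[:len(begikai) // 2])
--     while len(runs) > 1:
--         new_runs = []
--         i = 0
--         while i < len(runs):
--             if i + 1 < len(runs):
--                 new_runs.append(_merge(runs[i], runs[i + 1]))
--             else:
--                 new_runs.append(runs[i])
--             i += 2
--         runs = new_runs
--     return runs[0] if runs else []
-- ===== Notes on version B (the rewrite author's own statement) =====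
-- stated objective: alternative
-- what changed: Instead of concatenating the selected half of every group and re-sorting the whole collection at the end, B keeps each half as an already-sorted run and combines the runs by repeated passes of stable two-pointer merges of adjacent runs (bottom-up k-way merge), so no final sort is performed.
import Mathlib
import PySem

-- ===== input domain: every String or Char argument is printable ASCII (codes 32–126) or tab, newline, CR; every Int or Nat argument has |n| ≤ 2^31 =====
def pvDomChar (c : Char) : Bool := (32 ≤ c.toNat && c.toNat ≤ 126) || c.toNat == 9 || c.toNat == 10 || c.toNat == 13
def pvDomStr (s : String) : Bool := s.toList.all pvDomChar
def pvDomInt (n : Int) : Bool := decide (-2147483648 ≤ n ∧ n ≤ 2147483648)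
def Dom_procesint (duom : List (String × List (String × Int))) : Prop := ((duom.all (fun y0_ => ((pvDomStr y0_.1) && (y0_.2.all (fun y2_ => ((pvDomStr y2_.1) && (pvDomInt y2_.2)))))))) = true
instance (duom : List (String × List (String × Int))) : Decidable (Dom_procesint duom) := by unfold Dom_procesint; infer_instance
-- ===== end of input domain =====

-- B replaces A's final full sort of the concatenated group-halves with a stable two-pointer
-- merge of the already-sorted half runs (alternative algorithm, same return value; in Python
-- both A and B sort the caller's inner lists in place — the equivalence proved is about the
-- return value).

-- ===== PORT A =====
def procesint (duom : List (String × List (String × Int))) : List (String × Int) :=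
  let atrinkti := duom.foldl (fun atrinkti gp =>
    let begikai := PySem.List.sorted gp.2 (fun x => x.2)
    let kiek_atrinkti := PySem.Int.floordiv (begikai.length : Int) 2
    atrinkti ++ PySem.List.slice begikai none (some kiek_atrinkti)) []
  PySem.List.sorted atrinkti (fun x => x.2)

-- ===== PORT B =====
-- Source B's _merge: two-pointer stable merge of two runs (left run first on equal keys)
def mergeRun : List (String × Int) → List (String × Int) → List (String × Int)
  | [], b => b
  | x :: a, [] => x :: a
  | x :: a, y :: b =>
    if x.2 ≤ y.2 then x :: mergeRun a (y :: b) else y :: mergeRun (x :: a) b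

-- one pass of Source B's inner while loop: merge adjacent pairs of runs
def mergePass : List (List (String × Int)) → List (List (String × Int))
  | r1 :: r2 :: rest => mergeRun r1 r2 :: mergePass rest
  | rs => rs

-- termination helper for mergeAll (cited in its decreasing_by)
lemma mergePass_length_le : ∀ rs : List (List (String × Int)), (mergePass rs).length ≤ rs.length
  | [] => le_refl _
  | [r] => le_refl _
  | r1 :: r2 :: rest => by
      simp only [mergePass, List.length_cons]
      have := mergePass_length_le rest
      omega

-- Source B's outer while loop: repeat passes until at most one run is left
def mergeAll : List (List (String × Int)) → List (String × Int)
  | [] => []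
  | [r] => r
  | r1 :: r2 :: rest => mergeAll (mergePass (r1 :: r2 :: rest))
  termination_by rs => rs.length
  decreasing_by
    simp only [mergePass, List.length_cons]
    have := mergePass_length_le rest
    omega

def procesint_alt (duom : List (String × List (String × Int))) : List (String × Int) :=
  let runs := duom.foldl (fun runs gp =>
    let begikai := PySem.List.sorted gp.2 (fun x => x.2)
    runs ++ [PySem.List.slice begikai none (some (PySem.Int.floordiv (begikai.length : Int) 2))]) []
  mergeAll runs

-- ===== PRECONDITION & SPEC =====
def Spec_procesint (duom : List (String × List (String × Int))) (out : List (String × Int)) : Prop := out = procesint_alt duom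
instance (duom : List (String × List (String × Int))) (out : List (String × Int)) : Decidable (Spec_procesint duom out) := by unfold Spec_procesint; infer_instance

-- ===== CLAIM (what is proved, stated in full; the proofs are below) =====
def Claim_equal_procesint : Prop := ∀ (duom : List (String × List (String × Int))), Dom_procesint duom → Spec_procesint duom (procesint duom)

-- ===== LEMMAS AND PROOFS =====

-- the half-run selected from one group
def pvHalf (gp : String × List (String × Int)) : List (String × Int) :=
  PySem.List.slice (PySem.List.sorted gp.2 (fun x => x.2)) none
    (some (PySem.Int.floordiv (((PySem.List.sorted gp.2 (fun x => x.2)).length : Int)) 2))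

lemma pvHalf_pairwise (gp : String × List (String × Int)) :
    (pvHalf gp).Pairwise (fun u v : String × Int => u.2 ≤ v.2) := by
  unfold pvHalf
  rw [PySem.Int.floordiv_eq_ediv_of_pos (by norm_num),
      PySem.List.slice_to _ (by positivity)]
  exact List.Pairwise.sublist (List.take_sublist _ _)
    (PySem.List.sorted_pairwise gp.2 (fun x : String × Int => x.2))

lemma mergeRun_nil_right (a : List (String × Int)) : mergeRun a [] = a := by
  cases a <;> simp [mergeRun]

lemma ins_eq_sorted_append (a : List (String × Int)) (y : String × Int)
    (ha : a.Pairwise (fun u v : String × Int => u.2 ≤ v.2)) :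
    PySem.List.insertBy (fun u v : String × Int => decide (u.2 < v.2)) y a
      = PySem.List.sorted (a ++ [y]) (fun x => x.2) := by
  have h1 := PySem.List.sorted_eq_foldl_insertBy (a ++ [y]) (fun x : String × Int => x.2)
  have h2 := PySem.List.sorted_eq_foldl_insertBy a (fun x : String × Int => x.2)
  have h3 := PySem.List.sorted_eq_self_of_pairwise a (fun x : String × Int => x.2) ha
  simp only [List.foldl_append, List.foldl_cons, List.foldl_nil] at h1
  rw [h1, ← h2, h3]

lemma ins_pairwise (a : List (String × Int)) (y : String × Int)
    (ha : a.Pairwise (fun u v : String × Int => u.2 ≤ v.2)) :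
    (PySem.List.insertBy (fun u v : String × Int => decide (u.2 < v.2)) y a).Pairwise
      (fun u v : String × Int => u.2 ≤ v.2) := by
  rw [ins_eq_sorted_append a y ha]
  exact PySem.List.sorted_pairwise _ _

lemma merge_ins (y : String × Int) (b : List (String × Int))
    (hb : ∀ z ∈ b, y.2 ≤ z.2) (a : List (String × Int)) :
    mergeRun (PySem.List.insertBy (fun u v : String × Int => decide (u.2 < v.2)) y a) b
      = mergeRun a (y :: b) := by
  induction a with
  | nil =>
      cases b with
      | nil => simp [PySem.List.insertBy, mergeRun]
      | cons z b' =>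
          have hyz : y.2 ≤ z.2 := hb z (by simp)
          simp [PySem.List.insertBy, mergeRun, hyz]
  | cons x a' IH =>
      by_cases h : y.2 < x.2
      · cases b with
        | nil =>
            simp [PySem.List.insertBy, mergeRun, h, not_le.mpr h]
        | cons z b' =>
            have hyz : y.2 ≤ z.2 := hb z (by simp)
            simp [PySem.List.insertBy, mergeRun, h, hyz, not_le.mpr h]
      · have hxy : x.2 ≤ y.2 := not_lt.mp h
        cases b with
        | nil =>
            simp only [mergeRun_nil_right] at IH
            simp [PySem.List.insertBy, mergeRun, h, hxy, IH, mergeRun_nil_right]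
        | cons z b' =>
            have hyz : y.2 ≤ z.2 := hb z (by simp)
            have hxz : x.2 ≤ z.2 := le_trans hxy hyz
            simp [PySem.List.insertBy, mergeRun, h, hxy, hxz, IH]

lemma foldl_ins_eq_mergeRun (b : List (String × Int)) :
    ∀ a : List (String × Int),
      a.Pairwise (fun u v : String × Int => u.2 ≤ v.2) →
      b.Pairwise (fun u v : String × Int => u.2 ≤ v.2) →
      b.foldl (fun acc x =>
          PySem.List.insertBy (fun u v : String × Int => decide (u.2 < v.2)) x acc) a
        = mergeRun a b := by
  induction b with
  | nil => intro a _ _; simp [mergeRun_nil_right]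
  | cons y b' IH =>
      intro a ha hb
      rcases List.pairwise_cons.mp hb with ⟨hyb, hb'⟩
      rw [List.foldl_cons, IH _ (ins_pairwise a y ha) hb', merge_ins y b' hyb a]

lemma sorted_append_run (X r : List (String × Int))
    (hr : r.Pairwise (fun u v : String × Int => u.2 ≤ v.2)) :
    PySem.List.sorted (X ++ r) (fun x => x.2)
      = mergeRun (PySem.List.sorted X (fun x => x.2)) r := by
  have h1 := PySem.List.sorted_eq_foldl_insertBy (X ++ r) (fun x : String × Int => x.2)
  have h2 := PySem.List.sorted_eq_foldl_insertBy X (fun x : String × Int => x.2)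
  rw [h1, List.foldl_append, ← h2,
      foldl_ins_eq_mergeRun r _ (PySem.List.sorted_pairwise X _) hr]

lemma foldl_mergeRun_eq_sorted_flatten :
    ∀ rs : List (List (String × Int)),
      (∀ r ∈ rs, r.Pairwise (fun u v : String × Int => u.2 ≤ v.2)) →
      rs.foldl (fun out run => mergeRun out run) []
        = PySem.List.sorted rs.flatten (fun x => x.2) := by
  intro rs
  induction rs using List.reverseRecOn with
  | nil => intro _; rfl
  | append_singleton rs r IH =>
      intro hall
      rw [List.foldl_append, List.foldl_cons, List.foldl_nil,
          IH (fun r hr => hall r (by simp [hr])),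
          ← sorted_append_run rs.flatten r (hall r (by simp))]
      simp

theorem procesint_eq_sorted_flatMap (duom : List (String × List (String × Int))) :
    procesint duom = PySem.List.sorted (duom.flatMap pvHalf) (fun x => x.2) := by
  unfold procesint
  rw [show (fun (atrinkti : List (String × Int)) (gp : String × List (String × Int)) =>
        atrinkti ++ PySem.List.slice (PySem.List.sorted gp.2 (fun x => x.2)) none
          (some (PySem.Int.floordiv (((PySem.List.sorted gp.2 (fun x => x.2)).length : Int)) 2)))
      = (fun acc gp => acc ++ pvHalf gp) from rfl,
    PySem.List.foldl_append_eq_flatMap pvHalf duom []]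
  rfl

lemma mergeRun_nil_left (b : List (String × Int)) : mergeRun [] b = b := by
  simp [mergeRun]

lemma mergeRun_assoc : ∀ a b c : List (String × Int),
    mergeRun (mergeRun a b) c = mergeRun a (mergeRun b c)
  | [], b, c => by simp [mergeRun_nil_left]
  | x :: a, [], c => by simp [mergeRun_nil_right, mergeRun_nil_left]
  | x :: a, y :: b, [] => by simp [mergeRun_nil_right]
  | x :: a, y :: b, z :: c => by
    by_cases hxy : x.2 ≤ y.2
    · by_cases hyz : y.2 ≤ z.2
      · have hxz : x.2 ≤ z.2 := le_trans hxy hyz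
        have h1 := mergeRun_assoc a (y :: b) (z :: c)
        simp [mergeRun, hxy, hyz, hxz, h1]
      · by_cases hxz : x.2 ≤ z.2
        · have h1 := mergeRun_assoc a (y :: b) (z :: c)
          simp [mergeRun, hxy, hyz, hxz, h1]
        · have h1 := mergeRun_assoc (x :: a) (y :: b) c
          rw [show mergeRun (x :: a) (y :: b) = x :: mergeRun a (y :: b) from by
            simp [mergeRun, hxy]] at h1
          simp [mergeRun, hxy, hyz, hxz, h1]
    · by_cases hyz : y.2 ≤ z.2
      · have h1 := mergeRun_assoc (x :: a) b (z :: c)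
        simp [mergeRun, hxy, hyz, h1]
      · have hxz : ¬ x.2 ≤ z.2 := fun h => hxy (le_trans h (le_of_lt (not_le.mp hyz)))
        have h1 := mergeRun_assoc (x :: a) (y :: b) c
        rw [show mergeRun (x :: a) (y :: b) = y :: mergeRun (x :: a) b from by
          simp [mergeRun, hxy]] at h1
        simp [mergeRun, hxy, hyz, hxz, h1]
  termination_by a b c => a.length + b.length + c.length
  decreasing_by all_goals (simp only [List.length_cons]; omega)

lemma mergePass_foldl : ∀ (rs : List (List (String × Int))) (e : List (String × Int)),
    (mergePass rs).foldl (fun out run => mergeRun out run) e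
      = rs.foldl (fun out run => mergeRun out run) e
  | [], e => rfl
  | [r], e => rfl
  | r1 :: r2 :: rest, e => by
      simp only [mergePass, List.foldl_cons]
      rw [mergePass_foldl rest, ← mergeRun_assoc]

lemma mergeAll_eq_foldl : ∀ rs : List (List (String × Int)),
    mergeAll rs = rs.foldl (fun out run => mergeRun out run) []
  | [] => by simp [mergeAll]
  | [r] => by simp [mergeAll, mergeRun_nil_left]
  | r1 :: r2 :: rest => by
      rw [mergeAll, mergeAll_eq_foldl (mergePass (r1 :: r2 :: rest)), mergePass_foldl]
  termination_by rs => rs.length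
  decreasing_by
    simp only [mergePass, List.length_cons]
    have := mergePass_length_le rest
    omega

theorem procesint_alt_eq_foldl_merge (duom : List (String × List (String × Int))) :
    procesint_alt duom = (duom.map pvHalf).foldl (fun out run => mergeRun out run) [] := by
  unfold procesint_alt
  rw [show (fun (runs : List (List (String × Int))) (gp : String × List (String × Int)) =>
        runs ++ [PySem.List.slice (PySem.List.sorted gp.2 (fun x => x.2)) none
          (some (PySem.Int.floordiv (((PySem.List.sorted gp.2 (fun x => x.2)).length : Int)) 2))])
      = (fun acc gp => acc ++ [pvHalf gp]) from rfl,
    PySem.List.foldl_append_singleton_eq_map pvHalf duom [],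
    List.nil_append, mergeAll_eq_foldl]

-- ===== VERDICT (by name: the statement is the Claim_ definition above) =====
theorem procesint_spec : Claim_equal_procesint := by
  intro duom _
  unfold Spec_procesint
  rw [procesint_eq_sorted_flatMap, procesint_alt_eq_foldl_merge,
      foldl_mergeRun_eq_sorted_flatten (duom.map pvHalf)
        (by intro r hr; rcases List.mem_map.mp hr with ⟨gp, _, rfl⟩; exact pvHalf_pairwise gp),
      List.flatMap_def]
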